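-- pv_equiv track=rewrite | github.com/HassnHamada/CP-Solutions | 327A.py | my_sum
-- ===== SOURCE A (Python) =====
-- def my_sum(arr, n, i, j):
--     for k in range(n):
--         if j >= k >= i:
--             arr[k] ^= 1
--     ret = sum(arr)
--     for k in range(n):
--         if j >= k >= i:
--             arr[k] ^= 1
--     return ret
-- ===== SOURCE B (Python) =====
-- def my_sum(arr, n, i, j):
--     total = 0
--     for k, v in enumerate(arr):
--         if i <= k <= j and k < n:
--             v ^= 1
--         total += v
--     return total
-- ===== Notes on version B (the rewrite author's own statement) =====
-- stated objective: simpler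
-- what changed: B replaces A's three passes (flip arr[i..j] in place, sum the whole list, unflip in place) by a single non-mutating enumerate pass that XORs each element on the fly while accumulating the total.
import Mathlib
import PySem

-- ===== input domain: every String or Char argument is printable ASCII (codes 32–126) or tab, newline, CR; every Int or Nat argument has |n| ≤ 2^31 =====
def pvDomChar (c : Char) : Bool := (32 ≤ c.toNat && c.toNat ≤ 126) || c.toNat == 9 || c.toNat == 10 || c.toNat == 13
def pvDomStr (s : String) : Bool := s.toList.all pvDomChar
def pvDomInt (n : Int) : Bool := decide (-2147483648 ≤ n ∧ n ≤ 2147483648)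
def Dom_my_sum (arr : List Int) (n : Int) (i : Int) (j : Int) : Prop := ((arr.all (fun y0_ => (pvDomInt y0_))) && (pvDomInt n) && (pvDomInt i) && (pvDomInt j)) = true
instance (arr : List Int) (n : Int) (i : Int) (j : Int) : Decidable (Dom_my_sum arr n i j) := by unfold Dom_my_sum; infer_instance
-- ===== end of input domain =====

-- B computes A's result in one non-mutating enumerate pass (XOR on the fly) instead of A's
-- flip / sum / unflip three-pass structure; equivalence is about the RETURN value only
-- (A mutates arr in place but restores it, a net no-op on every input Pre_ admits).


-- ===== PORT A =====
-- first loop: flip arr[k] for k in range(n) with j >= k >= i, in place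
def my_sum (arr : List Int) (n : Int) (i : Int) (j : Int) : Int :=
  let arr1 := (PySem.List.pyRange 0 n 1).foldl
    (fun a k =>
      if j ≥ k ∧ k ≥ i then
        PySem.List.pySetD a k (PySem.Int.bxor (PySem.List.pyGetD a k 0) 1)
      else a) arr
  let ret := arr1.sum
  -- the second Python loop re-flips arr1 back in place; it does not touch ret, which is returned
  ret

-- ===== PORT B =====
def my_sum_alt (arr : List Int) (n : Int) (i : Int) (j : Int) : Int :=
  (PySem.List.enumerate arr 0).foldl
    (fun total kv =>
      let v := if i ≤ kv.1 ∧ kv.1 ≤ j ∧ kv.1 < n then PySem.Int.bxor kv.2 1 else kv.2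
      total + v) 0

-- ===== PRECONDITION & SPEC =====
-- A raises IndexError iff the flipped index range [max(i,0), min(j,n-1)] reaches past the
-- end of arr, i.e. iff max(i,0,len) ≤ min(j,n-1); Pre_ excludes exactly those inputs.
def Pre_my_sum (arr : List Int) (n : Int) (i : Int) (j : Int) : Prop :=
  min j (n - 1) < max (max i 0) (arr.length : Int)
instance (arr : List Int) (n : Int) (i : Int) (j : Int) : Decidable (Pre_my_sum arr n i j) := by unfold Pre_my_sum; infer_instance
def pvWitness_my_sum : List Int × Int × Int × Int := ([1, 0, 1], 3, 1, 2)

def Spec_my_sum (arr : List Int) (n : Int) (i : Int) (j : Int) (out : Int) : Prop := out = my_sum_alt arr n i j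
instance (arr : List Int) (n : Int) (i : Int) (j : Int) (out : Int) : Decidable (Spec_my_sum arr n i j out) := by unfold Spec_my_sum; infer_instance

-- ===== CLAIM (what is proved, stated in full; the proofs are below) =====
def Claim_equal_my_sum : Prop := ∀ (arr : List Int) (n : Int) (i : Int) (j : Int), Dom_my_sum arr n i j → Pre_my_sum arr n i j → Spec_my_sum arr n i j (my_sum arr n i j)

-- ===== LEMMAS AND PROOFS =====

-- the common normal form: arr with element t XOR-flipped when i ≤ t ≤ j ∧ t < N
def pvFlip (i j N : Int) (arr : List Int) : List Int :=
  arr.mapIdx (fun t v => if i ≤ (t : Int) ∧ (t : Int) ≤ j ∧ (t : Int) < N then PySem.Int.bxor v 1 else v)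

theorem pvFlip_congr (i j N N' : Int) (arr : List Int)
    (h : ∀ t : Nat, t < arr.length →
      ((i ≤ (t : Int) ∧ (t : Int) ≤ j ∧ (t : Int) < N) ↔ (i ≤ (t : Int) ∧ (t : Int) ≤ j ∧ (t : Int) < N'))) :
    pvFlip i j N arr = pvFlip i j N' arr := by
  unfold pvFlip
  apply List.ext_getElem (by simp)
  intro t h1 h2
  simp only [List.getElem_mapIdx]
  have ht := h t (by simpa using h1)
  by_cases hc : i ≤ (t : Int) ∧ (t : Int) ≤ j ∧ (t : Int) < N
  · rw [if_pos hc, if_pos (ht.mp hc)]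
  · rw [if_neg hc, if_neg (fun hc' => hc (ht.mpr hc'))]

theorem pvFlip_nonpos (i j N : Int) (arr : List Int) (hN : N ≤ 0) : pvFlip i j N arr = arr := by
  unfold pvFlip
  apply List.ext_getElem (by simp)
  intro t h1 h2
  simp only [List.getElem_mapIdx]
  rw [if_neg]
  rintro ⟨-, -, h3⟩
  omega

theorem my_sum_flip_fold (arr : List Int) (n i j : Int)
    (H : ∀ t : Nat, (t : Int) < n → i ≤ (t : Int) → (t : Int) ≤ j → t < arr.length) :
    ∀ m : Nat, (m : Int) ≤ n →
      (PySem.List.pyRange 0 (m : Int) 1).foldl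
        (fun a k =>
          if j ≥ k ∧ k ≥ i then
            PySem.List.pySetD a k (PySem.Int.bxor (PySem.List.pyGetD a k 0) 1)
          else a) arr
      = pvFlip i j (m : Int) arr := by
  intro m
  induction m with
  | zero =>
    intro _
    rw [PySem.List.pyRange_one_eq_nil (by norm_num), List.foldl_nil,
        show ((0 : Nat) : Int) = 0 from rfl, pvFlip_nonpos i j 0 arr le_rfl]
  | succ m ih =>
    intro hm
    have hm' : (m : Int) ≤ n := by push_cast at hm ⊢; omega
    rw [show ((m + 1 : Nat) : Int) = (m : Int) + 1 by push_cast; ring,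
        PySem.List.pyRange_one_succ_right (by positivity), List.foldl_append, ih hm',
        List.foldl_cons, List.foldl_nil]
    by_cases hc : j ≥ (m : Int) ∧ (m : Int) ≥ i
    · have hlen : m < arr.length := H m (by omega) (by omega) (by omega)
      rw [if_pos hc]
      have hget : PySem.List.pyGetD (pvFlip i j (m : Int) arr) (m : Int) 0 = arr[m] := by
        rw [PySem.List.pyGetD_natCast]
        unfold pvFlip
        rw [List.getD_eq_getElem?_getD, List.getElem?_mapIdx]
        simp only [List.getElem?_eq_getElem hlen, Option.map_some]
        rw [if_neg (by omega)]
        rfl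
      rw [hget, PySem.List.pySetD_natCast]
      apply List.ext_getElem (by simp [pvFlip])
      intro t h1 h2
      unfold pvFlip
      have hlt : t < arr.length := by simpa [pvFlip] using h1
      simp only [List.getElem_set, List.getElem_mapIdx]
      by_cases ht : m = t
      · subst ht
        rw [if_pos rfl, if_pos (by omega)]
      · rw [if_neg ht]
        by_cases hc2 : i ≤ (t : Int) ∧ (t : Int) ≤ j ∧ (t : Int) < (m : Int)
        · rw [if_pos hc2, if_pos ⟨hc2.1, hc2.2.1, by omega⟩]
        · rw [if_neg hc2, if_neg (by
            rintro ⟨a1, a2, a3⟩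
            exact hc2 ⟨a1, a2, by omega⟩)]
    · rw [if_neg hc]
      apply pvFlip_congr
      intro t ht
      constructor <;> (rintro ⟨a1, a2, a3⟩; exact ⟨a1, a2, by omega⟩)

theorem my_sum_alt_enum (n i j : Int) :
    ∀ (arr : List Int) (s acc : Int),
      (PySem.List.enumerate arr s).foldl
        (fun total kv =>
          let v := if i ≤ kv.1 ∧ kv.1 ≤ j ∧ kv.1 < n then PySem.Int.bxor kv.2 1 else kv.2
          total + v) acc
      = acc + (arr.mapIdx (fun t v =>
          if i ≤ s + (t : Int) ∧ s + (t : Int) ≤ j ∧ s + (t : Int) < n then PySem.Int.bxor v 1 else v)).sum := by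
  intro arr
  induction arr with
  | nil => intro s acc; simp [PySem.List.enumerate_nil]
  | cons x xs ih =>
    intro s acc
    rw [PySem.List.enumerate_cons, List.foldl_cons, List.mapIdx_cons, List.sum_cons, ih]
    have hfun : (fun (t : Nat) (v : Int) =>
        if i ≤ (s + 1) + (t : Int) ∧ (s + 1) + (t : Int) ≤ j ∧ (s + 1) + (t : Int) < n then PySem.Int.bxor v 1 else v)
      = (fun (t : Nat) (v : Int) =>
        if i ≤ s + ((t + 1 : Nat) : Int) ∧ s + ((t + 1 : Nat) : Int) ≤ j ∧ s + ((t + 1 : Nat) : Int) < n then PySem.Int.bxor v 1 else v) := by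
      funext t v
      have : (s + 1) + (t : Int) = s + ((t + 1 : Nat) : Int) := by push_cast; ring
      rw [this]
    rw [hfun]
    simp only [Nat.cast_zero, add_zero]
    ring

theorem my_sum_eq_flip_sum (arr : List Int) (n i j : Int)
    (H : ∀ t : Nat, (t : Int) < n → i ≤ (t : Int) → (t : Int) ≤ j → t < arr.length) :
    my_sum arr n i j = (pvFlip i j n arr).sum := by
  unfold my_sum
  by_cases hn : 0 ≤ n
  · have := my_sum_flip_fold arr n i j H n.toNat (by omega)
    rw [show ((n.toNat : Nat) : Int) = n by omega] at this
    simp only [this]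
  · rw [PySem.List.pyRange_one_eq_nil (by omega), List.foldl_nil,
        pvFlip_nonpos i j n arr (by omega)]

theorem my_sum_alt_eq_flip_sum (arr : List Int) (n i j : Int) :
    my_sum_alt arr n i j = (pvFlip i j n arr).sum := by
  unfold my_sum_alt pvFlip
  rw [my_sum_alt_enum n i j arr 0 0]
  simp

-- ===== VERDICT (by name: the statement is the Claim_ definition above) =====
theorem my_sum_spec : Claim_equal_my_sum := by
  intro arr n i j _ hpre
  unfold Spec_my_sum
  unfold Pre_my_sum at hpre
  have H : ∀ t : Nat, (t : Int) < n → i ≤ (t : Int) → (t : Int) ≤ j → t < arr.length := by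
    intro t h1 h2 h3
    omega
  rw [my_sum_alt_eq_flip_sum, my_sum_eq_flip_sum arr n i j H]
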